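-- pv_equiv track=rewrite | github.com/Staudinger0325/comfun-lrj | helperfunc.py | interleave
-- ===== SOURCE A (Python) =====
-- def interleave(data_bits, depth, width):
--     """
-- @desc:	对输入比特序列进行块交织。
-- @para:	data_bits (list): 输入的比特序列 (0 或 1)。
-- @para:	depth (int): 交织器的行数。
-- @para:	width (int): 交织器的列数。
-- @rtrn:	list: 交织后的比特序列。
--     """
--     interleaver_capacity = depth * width
--
--     padding_needed = (interleaver_capacity - (len(data_bits) % interleaver_capacity)) % interleaver_capacity
--     padded_data_bits = data_bits + [0] * padding_needed
--
--     if len(padded_data_bits) < interleaver_capacity: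
--         padded_data_bits.extend([0] * (interleaver_capacity - len(padded_data_bits)))
--     elif len(padded_data_bits) % interleaver_capacity != 0:
--         padded_data_bits.extend([0] * (interleaver_capacity - (len(padded_data_bits) % interleaver_capacity)))
--
--     interleaved_bits = []
--
--     for i in range(0, len(padded_data_bits), interleaver_capacity):
--         current_block = padded_data_bits[i : i + interleaver_capacity]
--
--         if len(current_block) < interleaver_capacity:
--             current_block.extend([0] * (interleaver_capacity - len(current_block)))
--         elif len(current_block) > interleaver_capacity:
--             current_block = current_block[:interleaver_capacity]
--
--         matrix = []
--         for r in range(depth):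
--             row = []
--             for c in range(width):
--                 row.append(current_block[r * width + c])
--             matrix.append(row)
--
--         for c in range(width):
--             for r in range(depth):
--                 interleaved_bits.append(matrix[r][c])
--
--     return interleaved_bits
-- ===== SOURCE B (Python) =====
-- def interleave(data_bits, depth, width):
--     cap = depth * width
--     padded = data_bits + [0] * ((-len(data_bits)) % cap)
--     out = []
--     for i in range(0, len(padded), cap):
--         block = padded[i:i + cap]
--         for c in range(width):
--             out.extend(block[c::width])
--     return out
-- ===== Notes on version B (the rewrite author's own statement) =====
-- stated objective: simpler
-- what changed: Replaces the build-matrix-then-read-columns per block (and A's redundant re-padding branches) with a single strided slice block[c::width] per column, never materialising the depth x width matrix.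
-- intended difference: On an empty data_bits with depth>0 and width>0, A's dead defensive branch pads the empty input up to one full block and returns depth*width zeros, while B returns [] - the intended interleaving of an empty sequence is empty. — e.g. on interleave([], 2, 2): A returns [0, 0, 0, 0], B returns []
import Mathlib
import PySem

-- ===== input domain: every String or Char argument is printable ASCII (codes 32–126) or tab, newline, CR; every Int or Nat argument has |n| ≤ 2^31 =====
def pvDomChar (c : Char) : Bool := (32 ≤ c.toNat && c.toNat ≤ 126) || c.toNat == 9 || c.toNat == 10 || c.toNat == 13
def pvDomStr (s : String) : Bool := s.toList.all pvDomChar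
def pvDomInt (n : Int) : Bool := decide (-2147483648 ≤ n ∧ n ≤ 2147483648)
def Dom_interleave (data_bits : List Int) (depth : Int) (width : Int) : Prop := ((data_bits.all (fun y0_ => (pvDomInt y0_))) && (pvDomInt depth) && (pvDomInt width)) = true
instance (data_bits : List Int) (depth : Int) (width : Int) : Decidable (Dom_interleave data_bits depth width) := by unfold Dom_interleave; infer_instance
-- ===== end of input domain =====

-- B drops A's depth×width matrix (and A's dead re-padding branches): each block is read
-- column-by-column with a strided slice block[c::width] instead of building the matrix and
-- re-reading it; return-value equivalence only (neither program mutates its arguments).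

-- ===== PORT A =====
-- list indexing current_block[r*width+c] / matrix[r][c] is written with pyGetD: whenever these
-- loops run (depth>0 and width>0) the index is in range, so the default is never used and the
-- port is exact.
def interleave (data_bits : List Int) (depth : Int) (width : Int) : List Int :=
  let cap := depth * width
  let paddingNeeded := PySem.Int.mod (cap - PySem.Int.mod (data_bits.length : Int) cap) cap
  let padded0 := data_bits ++ List.replicate paddingNeeded.toNat 0
  let padded :=
    if (padded0.length : Int) < cap then
      padded0 ++ List.replicate (cap - (padded0.length : Int)).toNat 0
    else if PySem.Int.mod (padded0.length : Int) cap ≠ 0 then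
      padded0 ++ List.replicate (cap - PySem.Int.mod (padded0.length : Int) cap).toNat 0
    else padded0
  (PySem.List.pyRange 0 (padded.length : Int) cap).foldl (fun acc i =>
    let block0 := PySem.List.slice padded (some i) (some (i + cap))
    let block :=
      if (block0.length : Int) < cap then
        block0 ++ List.replicate (cap - (block0.length : Int)).toNat 0
      else if (block0.length : Int) > cap then
        PySem.List.slice block0 none (some cap)
      else block0
    let matrix := (PySem.List.pyRange 0 depth 1).foldl (fun m r =>
      m ++ [(PySem.List.pyRange 0 width 1).foldl (fun row c =>
        row ++ [PySem.List.pyGetD block (r * width + c) 0]) []]) []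
    (PySem.List.pyRange 0 width 1).foldl (fun a c =>
      (PySem.List.pyRange 0 depth 1).foldl (fun a2 r =>
        a2 ++ [PySem.List.pyGetD (PySem.List.pyGetD matrix r []) c 0]) a) acc) []

-- ===== PORT B =====
-- block[c::width]: the extended slice is PySem.List.slice?; it is none only for step 0, and the
-- loop over range(width) is empty whenever width ≤ 0, so the .getD [] is never used.
def interleave_alt (data_bits : List Int) (depth : Int) (width : Int) : List Int :=
  let cap := depth * width
  let padded := data_bits ++
    List.replicate (PySem.Int.mod (-(data_bits.length : Int)) cap).toNat 0
  (PySem.List.pyRange 0 (padded.length : Int) cap).foldl (fun out i =>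
    let block := PySem.List.slice padded (some i) (some (i + cap))
    (PySem.List.pyRange 0 width 1).foldl (fun out c =>
      out ++ (PySem.List.slice? block (some c) none width).getD []) out) []

-- ===== PRECONDITION & SPEC =====
-- Pre_ excludes only depth*width == 0 (depth == 0 or width == 0), where Python's `%` by the zero
-- interleaver capacity raises ZeroDivisionError in A (and in B).
def Pre_interleave (data_bits : List Int) (depth : Int) (width : Int) : Prop :=
  depth ≠ 0 ∧ width ≠ 0
instance (data_bits : List Int) (depth : Int) (width : Int) : Decidable (Pre_interleave data_bits depth width) := by unfold Pre_interleave; infer_instance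
def pvWitness_interleave : List Int × Int × Int := ([1, 0, 1], 2, 2)

-- On an empty data_bits with depth>0 and width>0, A's dead defensive branch pads the empty input
-- up to one full block and returns depth*width zeros, while B returns [] — the intended
-- interleaving of an empty sequence is empty.
def D_interleave (data_bits : List Int) (depth : Int) (width : Int) : Prop :=
  data_bits = [] ∧ 0 < depth ∧ 0 < width
instance (data_bits : List Int) (depth : Int) (width : Int) : Decidable (D_interleave data_bits depth width) := by unfold D_interleave; infer_instance

def Spec_interleave (data_bits : List Int) (depth : Int) (width : Int) (out : List Int) : Prop := ¬ D_interleave data_bits depth width → out = interleave_alt data_bits depth width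
instance (data_bits : List Int) (depth : Int) (width : Int) (out : List Int) : Decidable (Spec_interleave data_bits depth width out) := by unfold Spec_interleave; infer_instance

def pvDiffWitness_interleave : List Int × Int × Int := ([], 2, 2)
def pvDiffWitnessOut_interleave : (List Int) × (List Int) := ([0, 0, 0, 0], [])

-- ===== CLAIM (what is proved, stated in full; the proofs are below) =====
def Claim_unchanged_interleave : Prop := ∀ (data_bits : List Int) (depth : Int) (width : Int), Dom_interleave data_bits depth width → Pre_interleave data_bits depth width → Spec_interleave data_bits depth width (interleave data_bits depth width)
def Claim_changed_interleave : Prop := Dom_interleave (pvDiffWitness_interleave.1) (pvDiffWitness_interleave.2.1) (pvDiffWitness_interleave.2.2) ∧ Pre_interleave (pvDiffWitness_interleave.1) (pvDiffWitness_interleave.2.1) (pvDiffWitness_interleave.2.2) ∧ D_interleave (pvDiffWitness_interleave.1) (pvDiffWitness_interleave.2.1) (pvDiffWitness_interleave.2.2) ∧ interleave (pvDiffWitness_interleave.1) (pvDiffWitness_interleave.2.1) (pvDiffWitness_interleave.2.2) = pvDiffWitnessOut_interleave.1 ∧ interleave_alt (pvDiffWitness_interleave.1) (pvDiffWitness_interleave.2.1)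 (pvDiffWitness_interleave.2.2) = pvDiffWitnessOut_interleave.2 ∧ pvDiffWitnessOut_interleave.1 ≠ pvDiffWitnessOut_interleave.2
def Claim_exact_interleave : Prop := ∀ (data_bits : List Int) (depth : Int) (width : Int), Dom_interleave data_bits depth width → Pre_interleave data_bits depth width → D_interleave data_bits depth width → interleave data_bits depth width ≠ interleave_alt data_bits depth width

-- ===== LEMMAS AND PROOFS =====

-- the common column-wise read of one block
def pvCols (depth width : Int) (blk : List Int) : List Int :=
  (PySem.List.pyRange 0 width 1).flatMap (fun c =>
    (PySem.List.pyRange 0 depth 1).map (fun r => PySem.List.pyGetD blk (r * width + c) 0))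

theorem pvA_block (depth width : Int) (blk acc : List Int) :
    (PySem.List.pyRange 0 width 1).foldl (fun a c =>
      (PySem.List.pyRange 0 depth 1).foldl (fun a2 r =>
        a2 ++ [PySem.List.pyGetD (PySem.List.pyGetD
          ((PySem.List.pyRange 0 depth 1).foldl (fun m r =>
            m ++ [(PySem.List.pyRange 0 width 1).foldl (fun row c =>
              row ++ [PySem.List.pyGetD blk (r * width + c) 0]) []]) []) r []) c 0]) a) acc
    = acc ++ pvCols depth width blk := by
  simp only [PySem.List.foldl_append_singleton_eq_map, List.nil_append]
  rw [PySem.List.foldl_append_eq_flatMap]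
  unfold pvCols
  congr 1
  apply List.flatMap_congr
  intro c hc
  rcases PySem.List.mem_pyRange_one.mp hc with ⟨hc0, hcw⟩
  apply List.map_congr_left
  intro r hr
  rcases PySem.List.mem_pyRange_one.mp hr with ⟨hr0, hrd⟩
  rw [PySem.List.pyGetD_map_pyRange_of_nonneg _ _ _ _ hr0 hrd,
      PySem.List.pyGetD_map_pyRange_of_nonneg _ _ _ _ hc0 hcw]

theorem pvSliceCol (blk : List Int) (depth width c : Int) (hd : 0 < depth) (hw : 0 < width)
    (hc0 : 0 ≤ c) (hcw : c < width) (hlen : (blk.length : Int) = depth * width) :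
    (PySem.List.slice? blk (some c) none width).getD []
      = (List.range depth.toNat).map (fun k : Nat => blk.getD (c + width * (k : Int)).toNat 0) := by
  have hwlen : c < (blk.length : Int) := by nlinarith
  simp only [PySem.List.slice?, PySem.List.sliceIndices]
  rw [if_neg (show ¬ width = 0 by omega), if_neg (show ¬ width < 0 by omega),
      if_neg (show ¬ width < 0 by omega), if_neg (show ¬ c < 0 by omega),
      if_neg (show ¬ width < 0 by omega)]
  rw [min_eq_left (le_of_lt hwlen)]
  rw [if_pos hw, if_pos hwlen]
  have hcount : (↑blk.length - c + width - 1) / width = depth := by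
    have h1 : (↑blk.length : Int) - c + width - 1 = (width - 1 - c) + depth * width := by
      rw [hlen]; ring
    rw [h1, Int.add_mul_ediv_right _ _ (by omega : width ≠ 0),
        Int.ediv_eq_zero_of_lt (by omega) (by omega)]
    omega
  rw [hcount, Option.getD_some]
  rw [List.filterMap_congr (g := fun x : Nat => (some ∘ fun x : Nat => blk.getD (c + width * (x : Int)).toNat 0) x) ?_]
  · exact congrFun List.filterMap_eq_map _
  · intro x hx
    rw [List.mem_range] at hx
    have hix : (c + width * (x : Int)).toNat < blk.length := by
      have hxd : (x : Int) < depth := by omega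
      have : c + width * (x : Int) < depth * width := by nlinarith
      omega
    simp only [Function.comp_apply, List.getD_eq_getElem?_getD,
      List.getElem?_eq_getElem hix, Option.getD_some]

theorem pvB_block (depth width : Int) (blk acc : List Int)
    (hd : 0 < depth) (hw : 0 < width) (hlen : (blk.length : Int) = depth * width) :
    (PySem.List.pyRange 0 width 1).foldl (fun out c =>
      out ++ (PySem.List.slice? blk (some c) none width).getD []) acc
    = acc ++ pvCols depth width blk := by
  rw [PySem.List.foldl_append_eq_flatMap]
  unfold pvCols
  congr 1
  apply List.flatMap_congr
  intro c hc
  rcases PySem.List.mem_pyRange_one.mp hc with ⟨hc0, hcw⟩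
  rw [pvSliceCol blk depth width c hd hw hc0 hcw hlen]
  rw [PySem.List.pyRange_zero, List.map_map]
  apply List.map_congr_left
  intro k hk
  simp only [Function.comp_apply]
  rw [PySem.List.pyGetD_of_nonneg blk _
    (add_nonneg (mul_nonneg (Int.natCast_nonneg k) hw.le) hc0)]
  congr 1
  rw [mul_comm, add_comm]

theorem pvRangeNegNil (b s : Int) (hs : s < 0) (hb : 0 ≤ b) :
    PySem.List.pyRange 0 b s = [] := by
  unfold PySem.List.pyRange
  rw [if_neg (by omega : ¬ s = 0), if_neg (by omega : ¬ 0 < s), if_neg (by omega : ¬ b < 0)]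
  simp

theorem pvPadEq (len cap : Int) (h : 0 < cap) :
    PySem.Int.mod (cap - PySem.Int.mod len cap) cap = PySem.Int.mod (-len) cap := by
  rw [PySem.Int.mod_eq_emod_of_pos (h := h), PySem.Int.mod_eq_emod_of_pos (h := h),
      PySem.Int.mod_eq_emod_of_pos (h := h)]
  rw [Int.sub_emod cap (len % cap), Int.emod_emod_of_dvd _ dvd_rfl, Int.emod_self]
  rw [show (-len) = 0 - len by ring, Int.sub_emod 0 len, Int.zero_emod]

theorem pvPadDvd (len cap : Int) (h : 0 < cap) :
    cap ∣ (len + PySem.Int.mod (-len) cap) := by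
  rw [PySem.Int.mod_eq_emod_of_pos (h := h)]
  apply Int.dvd_of_emod_eq_zero
  rw [Int.add_emod, Int.emod_emod_of_dvd _ dvd_rfl, ← Int.add_emod]
  simp

theorem interleave_spec : Claim_unchanged_interleave := by
  intro data_bits depth width hdom hpre hnd
  obtain ⟨hd0, hw0⟩ := hpre
  show interleave data_bits depth width = interleave_alt data_bits depth width
  simp only [interleave, interleave_alt]
  by_cases hd : 0 < depth
  · by_cases hw : 0 < width
    · -- main case: cap > 0, data_bits nonempty (else D_ holds)
      have hcap : 0 < depth * width := mul_pos hd hw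
      have hne : data_bits ≠ [] := fun h => hnd ⟨h, hd, hw⟩
      have hlen1 : 1 ≤ (data_bits.length : Int) := by
        rcases data_bits with _ | ⟨x, xs⟩
        · exact absurd rfl hne
        · simp
      rw [pvPadEq (data_bits.length : Int) (depth * width) hcap]
      have hpad0 : 0 ≤ PySem.Int.mod (-(data_bits.length : Int)) (depth * width) :=
        PySem.Int.mod_nonneg _ hcap
      have hdvd := pvPadDvd (data_bits.length : Int) (depth * width) hcap
      set pad := PySem.Int.mod (-(data_bits.length : Int)) (depth * width) with hpaddef
      have hPlen : (((data_bits ++ List.replicate pad.toNat 0).length : Nat) : Int)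
          = (data_bits.length : Int) + pad := by
        simp [List.length_append]; omega
      rw [hPlen]
      have hLpos : 0 < (data_bits.length : Int) + pad := by omega
      have hLge : depth * width ≤ (data_bits.length : Int) + pad := Int.le_of_dvd hLpos hdvd
      rw [if_neg (by omega : ¬ ((data_bits.length : Int) + pad) < depth * width)]
      rw [if_neg (show ¬ ¬ PySem.Int.mod ((data_bits.length : Int) + pad) (depth * width) = 0 from
        not_not_intro ((PySem.Int.mod_eq_zero_iff_dvd _ _).mpr hdvd))]
      rw [hPlen]
      apply PySem.List.foldl_congr_mem
      intro acc i hi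
      rcases (PySem.List.mem_pyRange_iff_of_pos hcap i).mp hi with ⟨hi0, hiL, hidvd⟩
      rw [Int.sub_zero] at hidvd
      obtain ⟨k, hk⟩ := hidvd
      obtain ⟨m, hm⟩ := hdvd
      have hkm : k < m := lt_of_mul_lt_mul_left (by rw [← hk, ← hm]; exact hiL) hcap.le
      have hicap : i + depth * width ≤ (data_bits.length : Int) + pad := by
        have h1 : depth * width * (k + 1) ≤ depth * width * m :=
          mul_le_mul_of_nonneg_left (by omega) hcap.le
        calc i + depth * width = depth * width * (k + 1) := by rw [hk]; ring
          _ ≤ depth * width * m := h1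
          _ = (data_bits.length : Int) + pad := hm.symm
      have hblk : (((PySem.List.slice (data_bits ++ List.replicate pad.toNat 0)
          (some i) (some (i + depth * width))).length : Nat) : Int) = depth * width := by
        rw [PySem.List.slice_toNat _ (by omega) (by omega)]
        simp only [List.length_take, List.length_drop]
        have := hPlen
        omega
      rw [if_neg (by omega : ¬ (((PySem.List.slice (data_bits ++ List.replicate pad.toNat 0)
            (some i) (some (i + depth * width))).length : Nat) : Int) < depth * width),
          if_neg (by omega : ¬ (((PySem.List.slice (data_bits ++ List.replicate pad.toNat 0)
            (some i) (some (i + depth * width))).length : Nat) : Int) > depth * width)]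
      rw [pvA_block, pvB_block depth width _ acc hd hw hblk]
    · have hcap : depth * width < 0 := mul_neg_of_pos_of_neg hd (by omega)
      rw [pvRangeNegNil _ _ hcap (Int.natCast_nonneg _),
          pvRangeNegNil _ _ hcap (Int.natCast_nonneg _)]
      rfl
  · by_cases hw : 0 < width
    · have hcap : depth * width < 0 := mul_neg_of_neg_of_pos (by omega) hw
      rw [pvRangeNegNil _ _ hcap (Int.natCast_nonneg _),
          pvRangeNegNil _ _ hcap (Int.natCast_nonneg _)]
      rfl
    · have hwnil : PySem.List.pyRange 0 width 1 = [] :=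
        PySem.List.pyRange_one_eq_nil (by omega)
      simp only [hwnil, List.foldl_nil]
      rw [List.foldl_fixed, List.foldl_fixed]

theorem interleave_changed : Claim_changed_interleave := by
  unfold Claim_changed_interleave; decide

theorem pvCols_ne_nil (depth width : Int) (hd : 0 < depth) (hw : 0 < width) (blk : List Int) :
    pvCols depth width blk ≠ [] := by
  unfold pvCols
  rw [PySem.List.pyRange_one_cons (by omega : (0:Int) < width),
      PySem.List.pyRange_one_cons (by omega : (0:Int) < depth)]
  simp

theorem interleave_tight : Claim_exact_interleave := by
  intro data_bits depth width hdom hpre hD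
  obtain ⟨hnil, hd, hw⟩ := hD
  subst hnil
  have hcap : 0 < depth * width := mul_pos hd hw
  have hB : interleave_alt [] depth width = [] := by
    simp only [interleave_alt]
    simp [PySem.Int.mod, PySem.List.pyRange_of_pos _ _ hcap]
  have hA : interleave [] depth width
      = pvCols depth width (List.replicate (depth * width).toNat 0) := by
    simp only [interleave]
    have hpn : PySem.Int.mod (depth * width
        - PySem.Int.mod ((([] : List Int).length : Int)) (depth * width)) (depth * width) = 0 := by
      simp [PySem.Int.mod]
    rw [hpn]
    simp only [Int.toNat_zero, List.replicate_zero, List.append_nil, List.nil_append,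
      List.length_nil, Int.natCast_zero]
    rw [if_pos (by omega : (0:Int) < depth * width)]
    simp only [List.length_replicate, Int.sub_zero]
    have hlenrep : ((depth * width).toNat : Int) = depth * width := Int.toNat_of_nonneg hcap.le
    rw [hlenrep]
    have hrange : PySem.List.pyRange 0 (depth * width) (depth * width) = [0] := by
      rw [PySem.List.pyRange_of_pos _ _ hcap, if_pos hcap]
      have : (depth * width - 0 + depth * width - 1) / (depth * width) = 1 := by
        rw [show depth * width - 0 + depth * width - 1
            = (depth * width - 1) + 1 * (depth * width) by ring,
          Int.add_mul_ediv_right _ _ (by omega : depth * width ≠ 0),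
          Int.ediv_eq_zero_of_lt (by omega) (by omega)]
        omega
      rw [this]
      simp
    rw [hrange]
    simp only [List.foldl_cons, List.foldl_nil]
    have hsl : PySem.List.slice (List.replicate (depth * width).toNat (0:Int))
        (some 0) (some (0 + depth * width)) = List.replicate (depth * width).toNat 0 := by
      rw [PySem.List.slice_toNat _ (by omega) (by omega)]
      simp
    rw [hsl]
    rw [if_neg (by simp [hlenrep] : ¬ ((List.replicate (depth * width).toNat (0:Int)).length : Int) < depth * width),
        if_neg (by simp [hlenrep] : ¬ ((List.replicate (depth * width).toNat (0:Int)).length : Int) > depth * width)]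
    rw [pvA_block]
    rfl
  rw [hA, hB]
  exact pvCols_ne_nil depth width hd hw _
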